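-- pv_equiv track=rewrite | github.com/Ceryuan-3714/ai-recite-note | ImportMarkDown.py | replace_inside_brackets
-- ===== SOURCE A (Python) =====
-- def replace_inside_brackets(text):
--     result = []
--     inside = False
--     for char in text:
--         if char == '{':
--             inside = True
--             result.append('{')
--         elif char == '}':
--             inside = False
--             result.append('}')
--         elif inside:
--             result.append('?')
--         else:
--             result.append(char)
--     return ''.join(result)
-- ===== SOURCE B (Python) =====
-- import re
--
-- def replace_inside_brackets(text):
--     tokens = re.split(r'([{}])', text)
--     out = []
--     inside = False
--     for tok in tokens:
--         if tok == '{':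
--             inside = True
--             out.append('{')
--         elif tok == '}':
--             inside = False
--             out.append('}')
--         else:
--             out.append('?' * len(tok) if inside else tok)
--     return ''.join(out)
-- ===== Notes on version B (the rewrite author's own statement) =====
-- stated objective: idiomatic
-- what changed: Replaces the char-by-char state machine with a regex split that tokenizes the string on braces, followed by a per-segment map that blanks each inside segment wholesale.
import Mathlib
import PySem

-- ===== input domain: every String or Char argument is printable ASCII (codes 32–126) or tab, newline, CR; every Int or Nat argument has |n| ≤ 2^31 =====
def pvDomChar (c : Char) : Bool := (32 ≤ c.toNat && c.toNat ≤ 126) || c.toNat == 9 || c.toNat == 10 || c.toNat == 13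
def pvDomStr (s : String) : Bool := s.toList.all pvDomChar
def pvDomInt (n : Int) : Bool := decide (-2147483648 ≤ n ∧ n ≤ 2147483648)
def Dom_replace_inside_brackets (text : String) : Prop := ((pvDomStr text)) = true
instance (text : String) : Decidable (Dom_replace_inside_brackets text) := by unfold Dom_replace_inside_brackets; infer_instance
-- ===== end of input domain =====

-- B replaces A's char-by-char state machine with tokenize-then-map-over-segments (idiomatic decomposition); same result.

-- ===== PORT A =====
-- A's for-loop over characters with its `inside` flag and accumulator, appended at the end.
def pvALoop (cs : List Char) (inside : Bool) (acc : List Char) : List Char :=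
  match cs with
  | [] => acc
  | c :: rest =>
    if c = '{' then pvALoop rest true (acc ++ ['{'])
    else if c = '}' then pvALoop rest false (acc ++ ['}'])
    else if inside then pvALoop rest inside (acc ++ ['?'])
    else pvALoop rest inside (acc ++ [c])

def replace_inside_brackets (text : String) : String :=
  String.ofList (pvALoop text.toList false [])

-- ===== PORT B =====
-- re.split(r'([{}])', text): alternating non-brace segments and single-brace tokens.
def pvTok (cs : List Char) : List (List Char) :=
  match cs with
  | [] => [[]]
  | c :: rest =>
    if c = '{' ∨ c = '}' then [] :: [c] :: pvTok rest
    else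
      match pvTok rest with
      | t :: ts => (c :: t) :: ts
      | [] => [[c]]

-- the token loop of Source B: braces toggle `inside`, a segment is blanked wholesale when inside.
def pvProcTok (inside : Bool) (toks : List (List Char)) : List (List Char) :=
  match toks with
  | [] => []
  | t :: ts =>
    if t = ['{'] then ['{'] :: pvProcTok true ts
    else if t = ['}'] then ['}'] :: pvProcTok false ts
    else (if inside then List.replicate t.length '?' else t) :: pvProcTok inside ts

def replace_inside_brackets_alt (text : String) : String :=
  String.ofList (pvProcTok false (pvTok text.toList)).flatten

-- ===== PRECONDITION & SPEC =====
def Spec_replace_inside_brackets (text : String) (out : String) : Prop := out = replace_inside_brackets_alt text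
instance (text : String) (out : String) : Decidable (Spec_replace_inside_brackets text out) := by unfold Spec_replace_inside_brackets; infer_instance

-- ===== CLAIM (what is proved, stated in full; the proofs are below) =====
def Claim_equal_replace_inside_brackets : Prop := ∀ (text : String), Dom_replace_inside_brackets text → Spec_replace_inside_brackets text (replace_inside_brackets text)

-- ===== LEMMAS AND PROOFS =====

theorem pvALoop_acc (cs : List Char) : ∀ (inside : Bool) (acc : List Char),
    pvALoop cs inside acc = acc ++ pvALoop cs inside [] := by
  induction cs with
  | nil => intro inside acc; simp [pvALoop]
  | cons c rest ih =>
    intro inside acc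
    unfold pvALoop
    split_ifs
    · rw [ih, ih _ ([] ++ ['{'])]; simp
    · rw [ih, ih _ ([] ++ ['}'])]; simp
    · rw [ih, ih _ ([] ++ ['?'])]; simp
    · rw [ih, ih _ ([] ++ [c])]; simp

-- pvTok is nonempty and its head segment contains no brace
theorem pvTok_head (cs : List Char) :
    ∃ t ts, pvTok cs = t :: ts ∧ '{' ∉ t ∧ '}' ∉ t := by
  induction cs with
  | nil => exact ⟨[], [], rfl, by simp, by simp⟩
  | cons c rest ih =>
    by_cases h : c = '{' ∨ c = '}'
    · exact ⟨[], [c] :: pvTok rest, by simp [pvTok, h], by simp, by simp⟩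
    · obtain ⟨t, ts, ht, h1, h2⟩ := ih
      push Not at h
      refine ⟨c :: t, ts, ?_, ?_, ?_⟩
      · simp only [pvTok, if_neg (by tauto : ¬(c = '{' ∨ c = '}')), ht]
      · intro hm
        rcases List.mem_cons.mp hm with hc | hc
        · exact h.1 hc.symm
        · exact h1 hc
      · intro hm
        rcases List.mem_cons.mp hm with hc | hc
        · exact h.2 hc.symm
        · exact h2 hc

theorem pvProcTok_seg (inside : Bool) (t : List Char) (ts : List (List Char))
    (h1 : '{' ∉ t) (h2 : '}' ∉ t) :
    pvProcTok inside (t :: ts)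
      = (if inside then List.replicate t.length '?' else t) :: pvProcTok inside ts := by
  have e1 : t ≠ ['{'] := by intro h; subst h; simp at h1
  have e2 : t ≠ ['}'] := by intro h; subst h; simp at h2
  simp [pvProcTok, e1, e2]

theorem main_lemma (cs : List Char) : ∀ (inside : Bool),
    pvALoop cs inside [] = (pvProcTok inside (pvTok cs)).flatten := by
  induction cs with
  | nil =>
    intro inside
    cases inside <;> simp [pvALoop, pvTok, pvProcTok]
  | cons c rest ih =>
    intro inside
    by_cases hb : c = '{' ∨ c = '}'
    · have htk : pvTok (c :: rest) = [] :: [c] :: pvTok rest := by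
        simp [pvTok, hb]
      rcases hb with h | h <;> subst h
      · rw [htk]
        have hseg := pvProcTok_seg inside [] ([ '{' ] :: pvTok rest) (by simp) (by simp)
        rw [hseg]
        simp only [pvProcTok]
        unfold pvALoop
        rw [if_pos rfl, pvALoop_acc]
        cases inside <;> simp [ih true]
      · rw [htk]
        have hseg := pvProcTok_seg inside [] ([ '}' ] :: pvTok rest) (by simp) (by simp)
        rw [hseg]
        have : pvProcTok inside ([ '}' ] :: pvTok rest) = ['}'] :: pvProcTok false (pvTok rest) := by
          simp [pvProcTok]
        rw [this]
        unfold pvALoop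
        rw [if_neg (by decide), if_pos rfl, pvALoop_acc]
        cases inside <;> simp [ih false]
    · push Not at hb
      obtain ⟨t, ts, ht, h1, h2⟩ := pvTok_head rest
      have htk : pvTok (c :: rest) = (c :: t) :: ts := by
        simp only [pvTok, if_neg (by tauto : ¬(c = '{' ∨ c = '}')), ht]
      rw [htk, pvProcTok_seg inside (c :: t) ts
            (by simp [h1]; intro hc; exact absurd hc.symm hb.1)
            (by simp [h2]; intro hc; exact absurd hc.symm hb.2)]
      have hrest : pvALoop rest inside [] = (pvProcTok inside (t :: ts)).flatten := by
        rw [← ht]; exact ih inside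
      rw [pvProcTok_seg inside t ts h1 h2] at hrest
      unfold pvALoop
      rw [if_neg hb.1, if_neg hb.2]
      cases inside with
      | false =>
        simp only [Bool.false_eq_true, if_false] at hrest ⊢
        rw [pvALoop_acc]
        simp [hrest]
      | true =>
        simp only [if_true] at hrest ⊢
        rw [pvALoop_acc]
        simp [hrest, List.replicate_succ]

-- ===== VERDICT (by name: the statement is the Claim_ definition above) =====
theorem replace_inside_brackets_spec : Claim_equal_replace_inside_brackets := by
  intro text _
  unfold Spec_replace_inside_brackets replace_inside_brackets replace_inside_brackets_alt
  rw [main_lemma]
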